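-- pv_equiv track=rewrite | github.com/extraordinary6/TopStitcher | topstitcher/gui/schematic_canvas.py | _cells_clear
-- ===== SOURCE A (Python) =====
-- def _cells_clear(
--
--     cells: list[tuple[int, int]],
--     blocked: set[tuple[int, int]],
--     start_cell: tuple[int, int],
--     end_cell: tuple[int, int],
-- ) -> bool:
--     for cell in cells:
--         if cell in (start_cell, end_cell):
--             continue
--         if cell in blocked:
--             return False
--     return True
-- ===== SOURCE B (Python) =====
-- def _cells_clear(
--     cells: list[tuple[int, int]],
--     blocked: set[tuple[int, int]],
--     start_cell: tuple[int, int],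
--     end_cell: tuple[int, int],
-- ) -> bool:
--     # Inverted traversal: scan the blocked set, not the cell path.
--     # A blocked cell is harmless only if it never occurs on the path,
--     # or it is one of the two exempt endpoints.
--     cell_set = set(cells)
--     for b in blocked:
--         if b in cell_set and b != start_cell and b != end_cell:
--             return False
--     return True
-- ===== Notes on version B (the rewrite author's own statement) =====
-- stated objective: alternative
-- what changed: Inverts the traversal: instead of scanning the path cells and probing the blocked set, B builds a hash set of the cells once and scans the blocked collection, rejecting any blocked cell that lies on the path and is not an endpoint.
import Mathlib
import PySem

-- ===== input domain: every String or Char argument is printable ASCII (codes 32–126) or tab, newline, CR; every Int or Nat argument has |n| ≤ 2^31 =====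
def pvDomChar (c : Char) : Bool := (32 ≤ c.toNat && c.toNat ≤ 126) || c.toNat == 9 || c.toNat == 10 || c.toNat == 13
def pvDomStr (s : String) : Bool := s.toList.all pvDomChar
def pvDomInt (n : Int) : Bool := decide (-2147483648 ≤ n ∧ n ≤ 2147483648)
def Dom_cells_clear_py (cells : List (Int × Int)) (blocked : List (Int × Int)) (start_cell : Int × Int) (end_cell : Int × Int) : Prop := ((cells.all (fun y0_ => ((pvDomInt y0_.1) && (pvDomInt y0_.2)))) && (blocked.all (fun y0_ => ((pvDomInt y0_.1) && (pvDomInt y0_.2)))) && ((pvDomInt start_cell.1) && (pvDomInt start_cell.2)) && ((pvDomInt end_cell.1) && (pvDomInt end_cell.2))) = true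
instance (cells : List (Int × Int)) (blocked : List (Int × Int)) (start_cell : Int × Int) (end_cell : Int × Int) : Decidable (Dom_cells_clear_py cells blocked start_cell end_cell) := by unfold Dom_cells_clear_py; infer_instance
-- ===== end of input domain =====

-- B inverts the traversal: it builds a set of the cells once and scans the blocked
-- collection instead of the path; same boolean on every input (objective: alternative).

-- ===== PORT A =====
def cells_clear_py (cells : List (Int × Int)) (blocked : List (Int × Int)) (start_cell : Int × Int) (end_cell : Int × Int) : Bool :=
  match cells with
  | [] => true
  | cell :: rest =>
    if cell = start_cell ∨ cell = end_cell then
      cells_clear_py rest blocked start_cell end_cell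
    else if blocked.contains cell then false
    else cells_clear_py rest blocked start_cell end_cell

-- ===== PORT B =====
-- the 'for b in blocked: …' loop of Source B
def cellsClearAltLoop (cell_set : PySem.Set (Int × Int)) (start_cell end_cell : Int × Int) : List (Int × Int) → Bool
  | [] => true
  | b :: rest =>
    if cell_set.contains b ∧ b ≠ start_cell ∧ b ≠ end_cell then false
    else cellsClearAltLoop cell_set start_cell end_cell rest

def cells_clear_py_alt (cells : List (Int × Int)) (blocked : List (Int × Int)) (start_cell : Int × Int) (end_cell : Int × Int) : Bool :=
  let cell_set := PySem.Set.ofList cells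
  cellsClearAltLoop cell_set start_cell end_cell blocked

-- ===== PRECONDITION & SPEC =====
def Spec_cells_clear_py (cells : List (Int × Int)) (blocked : List (Int × Int)) (start_cell : Int × Int) (end_cell : Int × Int) (out : Bool) : Prop := out = cells_clear_py_alt cells blocked start_cell end_cell
instance (cells : List (Int × Int)) (blocked : List (Int × Int)) (start_cell : Int × Int) (end_cell : Int × Int) (out : Bool) : Decidable (Spec_cells_clear_py cells blocked start_cell end_cell out) := by unfold Spec_cells_clear_py; infer_instance

-- ===== CLAIM (what is proved, stated in full; the proofs are below) =====
def Claim_equal_cells_clear_py : Prop := ∀ (cells : List (Int × Int)) (blocked : List (Int × Int)) (start_cell : Int × Int) (end_cell : Int × Int), Dom_cells_clear_py cells blocked start_cell end_cell → Spec_cells_clear_py cells blocked start_cell end_cell (cells_clear_py cells blocked start_cell end_cell)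

-- ===== LEMMAS AND PROOFS =====
lemma cells_clear_py_iff (cells blocked : List (Int × Int)) (s e : Int × Int) :
    cells_clear_py cells blocked s e = true ↔
      ∀ c ∈ cells, ¬(c = s ∨ c = e) → c ∉ blocked := by
  induction cells with
  | nil => simp [cells_clear_py]
  | cons c rest ih =>
    by_cases h : c = s ∨ c = e
    · simp only [cells_clear_py, if_pos h, ih, List.mem_cons]
      constructor
      · intro hall x hx; rcases hx with rfl | hx
        · intro hne; exact absurd h hne
        · exact hall x hx
      · intro hall x hx; exact hall x (Or.inr hx)
    · by_cases hb : c ∈ blocked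
      · simp only [cells_clear_py, if_neg h, hb, List.elem_eq_contains.symm]
        simp only [List.elem_eq_mem, hb, decide_true, if_true]
        constructor
        · intro hf; exact absurd hf (by simp)
        · intro hall; exact absurd hb (hall c (List.mem_cons_self) h)
      · simp only [cells_clear_py, if_neg h]
        simp only [List.contains_eq_mem, hb, decide_false, Bool.false_eq_true, if_false, ih,
          List.mem_cons]
        constructor
        · intro hall x hx; rcases hx with rfl | hx
          · intro _; exact hb
          · exact hall x hx
        · intro hall x hx; exact hall x (Or.inr hx)

lemma cellsClearAltLoop_iff (cell_set : PySem.Set (Int × Int)) (s e : Int × Int)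
    (blocked : List (Int × Int)) :
    cellsClearAltLoop cell_set s e blocked = true ↔
      ∀ b ∈ blocked, cell_set.contains b → b = s ∨ b = e := by
  induction blocked with
  | nil => simp [cellsClearAltLoop]
  | cons b rest ih =>
    by_cases h : cell_set.contains b ∧ b ≠ s ∧ b ≠ e
    · simp only [cellsClearAltLoop, if_pos h, Bool.false_eq_true, false_iff]
      intro hall
      rcases h with ⟨hc, hs, he⟩
      rcases hall b (List.mem_cons_self) hc with h1 | h1
      · exact hs h1
      · exact he h1
    · simp only [cellsClearAltLoop, if_neg h, ih, List.mem_cons]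
      constructor
      · intro hall x hx hc
        rcases hx with rfl | hx
        · by_contra hne; push_neg at hne; exact h ⟨hc, hne.1, hne.2⟩
        · exact hall x hx hc
      · intro hall x hx hc; exact hall x (Or.inr hx) hc

lemma cells_clear_py_alt_iff (cells blocked : List (Int × Int)) (s e : Int × Int) :
    cells_clear_py_alt cells blocked s e = true ↔
      ∀ b ∈ blocked, b ∈ cells → b = s ∨ b = e := by
  simp only [cells_clear_py_alt, cellsClearAltLoop_iff]
  constructor
  · intro h b hb hc
    exact h b hb (by simpa [PySem.Set.contains] using (PySem.Set.mem_ofList (xs := cells) (y := b)).2 hc)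
  · intro h b hb hc
    exact h b hb ((PySem.Set.mem_ofList (xs := cells) (y := b)).1 (by simpa [PySem.Set.contains] using hc))

-- ===== VERDICT (by name: the statement is the Claim_ definition above) =====
theorem cells_clear_py_spec : Claim_equal_cells_clear_py := by
  intro cells blocked s e _
  unfold Spec_cells_clear_py
  rw [Bool.eq_iff_iff, cells_clear_py_iff, cells_clear_py_alt_iff]
  constructor
  · intro h b hb hc
    by_contra hne; push_neg at hne
    exact h b hc (by tauto) hb
  · intro h c hc hne hb
    rcases h c hb hc with h1 | h1 <;> tauto
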